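-- pv_equiv track=rewrite | github.com/alibaransel/code-jam | Round 1B 2013/Osmos.py | solve
-- ===== SOURCE A (Python) =====
-- def solve(a, n, motes):
--     if a == 1:
--         return n
--     absorbCount = 0
--     motes.sort()
--     moteList = []
--     for mote in motes:
--         if mote < a:
--             a += mote
--             absorbCount += 1
--         else:
--             extraMoteCount = 1
--             a += a - 1
--             while a <= mote:
--                 extraMoteCount += 1
--                 a += a - 1
--             moteList.append([extraMoteCount, n - absorbCount])
--             a += mote
--             absorbCount += 1
--     currCount = 0
--     minCount = 101
--     for (add, remove) in moteList:
--         minCount = min(minCount, currCount + remove)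
--         if add < remove:
--             currCount += add
--             if currCount >= minCount:
--                 return minCount
--         else:
--             return minCount
--     return min(minCount, currCount)
-- ===== SOURCE B (Python) =====
-- def solve(a, n, motes):
--     # Different algorithm: instead of collecting blocker events and scanning them with
--     # early exits, evaluate the cost of every cut position i in one sweep over the sorted
--     # motes (delete the suffix from i on: n - i removals, plus the additions committed so
--     # far); the additions needed at a blocker come from a ceil-division/bit-length closed
--     # form instead of a doubling loop.
--     if a == 1:
--         return n
--     best = 101  # A caps its answer at 101 (the contest guarantees n <= 100); matched for larger n
--     adds = 0
--     for i, mote in enumerate(sorted(motes)):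
--         best = min(best, adds + n - i)
--         if mote >= a:
--             q = -(-mote // (a - 1))          # ceil(mote / (a-1))
--             k = (q - 1).bit_length()         # doublings of a-1 needed to reach >= mote
--             adds += k
--             a = (a - 1) * (1 << k) + 1
--         a += mote
--     return min(best, adds)
-- ===== Notes on version B (the rewrite author's own statement) =====
-- stated objective: alternative
-- what changed: B drops A's blocker event list and early-exiting second scan entirely: it sweeps the sorted motes once, pricing every cut position i as adds-so-far + n - i, and computes each blocker's additions by a ceil-division/bit_length closed form instead of A's a += a - 1 doubling loop.
-- outside the precondition, e.g. on solve(-5, 3, [-10]): A returns 0, B returns 0; on solve(2, 0, [2, 2, 2]): A returns 0, B returns -1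
import Mathlib
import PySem

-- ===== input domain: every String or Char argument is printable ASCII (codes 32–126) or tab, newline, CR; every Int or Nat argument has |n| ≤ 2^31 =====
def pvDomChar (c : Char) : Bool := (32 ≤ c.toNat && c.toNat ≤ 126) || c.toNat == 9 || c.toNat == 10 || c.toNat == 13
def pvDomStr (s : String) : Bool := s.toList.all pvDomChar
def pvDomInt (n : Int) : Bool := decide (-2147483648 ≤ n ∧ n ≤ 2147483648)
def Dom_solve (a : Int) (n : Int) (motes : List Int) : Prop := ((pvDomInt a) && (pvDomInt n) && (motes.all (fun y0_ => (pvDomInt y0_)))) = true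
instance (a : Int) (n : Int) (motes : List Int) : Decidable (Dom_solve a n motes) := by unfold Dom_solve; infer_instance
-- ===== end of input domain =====

-- Osmos: B evaluates the cost of every cut position in one sweep over the sorted motes
-- (no blocker event list, no early exits) and gets each blocker's additions from a
-- ceil-division/bit-length closed form instead of A's doubling loop (objective: alternative).
-- Note: A sorts `motes` in place; the equivalence proved here is about the return value only.


-- ===== PORT A =====
-- A's inner `while a <= mote: extraMoteCount += 1; a += a - 1`, fuel-bounded to make it total
-- (the fuel at the call site is always sufficient on Pre_); returns (iterations, final a).
def dblA : Nat → Int → Int → Int × Int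
  | 0, a, _ => (0, a)
  | f + 1, a, mote =>
    if a ≤ mote then
      let r := dblA f (a + (a - 1)) mote
      (r.1 + 1, r.2)
    else (0, a)

-- A's first loop: builds moteList (entries [extraMoteCount, n - absorbCount]) while
-- threading a and absorbCount; returns (moteList, a, absorbCount).
def loop1A (n : Int) : List Int → Int → Int → List (Int × Int) × Int × Int
  | [], a, c => ([], a, c)
  | m :: rest, a, c =>
    if m < a then loop1A n rest (a + m) (c + 1)
    else
      let a1 := a + (a - 1)
      let r := dblA (m.natAbs + a.natAbs + 2) a1 m
      let cnt := 1 + r.1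
      let rec' := loop1A n rest (r.2 + m) (c + 1)
      ((cnt, n - c) :: rec'.1, rec'.2)

-- A's second loop over moteList with currCount / minCount and the early returns.
def loop2A : List (Int × Int) → Int → Int → Int
  | [], cur, mn => min mn cur
  | (add, remove) :: rest, cur, mn =>
    let mn' := min mn (cur + remove)
    if add < remove then
      let cur' := cur + add
      if mn' ≤ cur' then mn' else loop2A rest cur' mn'
    else mn'

def solve (a : Int) (n : Int) (motes : List Int) : Int :=
  if a = 1 then n
  else loop2A (loop1A n (PySem.List.sorted motes (fun x => x) false) a 0).1 0 101

-- ===== PORT B =====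
-- B's single sweep, state (a, i, adds, best): at every index the candidate
-- adds + n - i (cut here), and at a blocker the closed-form additions
-- k = (ceil(mote/(a-1)) - 1).bit_length() with a becoming (a-1)*2^k + 1 (+ mote);
-- the Python's locals q and k are inlined here.
def bpass (n : Int) : List Int → Int → Int → Int → Int → Int
  | [], _, _, adds, best => min best adds
  | m :: rest, a, i, adds, best =>
    if a ≤ m then
      bpass n rest
        ((a - 1) * 2 ^ (PySem.Int.bitLength (-(PySem.Int.floordiv (-m) (a - 1)) - 1)) + 1 + m)
        (i + 1)
        (adds + (PySem.Int.bitLength (-(PySem.Int.floordiv (-m) (a - 1)) - 1) : Int))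
        (min best (adds + n - i))
    else
      bpass n rest (a + m) (i + 1) adds (min best (adds + n - i))

def solve_alt (a : Int) (n : Int) (motes : List Int) : Int :=
  if a = 1 then n
  else bpass n (PySem.List.sorted motes (fun x => x) false) a 0 0 101

-- ===== PRECONDITION & SPEC =====
-- Pre_ excludes (i) a ≤ 0 and those a ≥ 2 whose negative motes can drag a below 2: there A's
-- doubling loop diverges as soon as a mote ≥ a is met (on the few such inputs where every mote
-- stays below a and A does return, B returns the same value — see cites); and (ii) inputs with
-- n < len(motes) - 1, outside the task's natural domain (n IS the number of motes in the Osmos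
-- problem), where A's early exit truncates its negative "remove" counts at a point B does not match.
def Pre_solve (a : Int) (n : Int) (motes : List Int) : Prop :=
  a = 1 ∨ (2 ≤ a ∧ 2 ≤ a + ((motes.filter (fun m => decide (m < 0))).sum)
            ∧ (motes.length : Int) ≤ n + 1)
instance (a : Int) (n : Int) (motes : List Int) : Decidable (Pre_solve a n motes) := by
  unfold Pre_solve; infer_instance

def pvWitness_solve : Int × Int × List Int := (2, 3, [1, 4, 9])

def Spec_solve (a : Int) (n : Int) (motes : List Int) (out : Int) : Prop := out = solve_alt a n motes
instance (a : Int) (n : Int) (motes : List Int) (out : Int) : Decidable (Spec_solve a n motes out) := by unfold Spec_solve; infer_instance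

-- ===== CLAIM (what is proved, stated in full; the proofs are below) =====
def Claim_equal_solve : Prop := ∀ (a : Int) (n : Int) (motes : List Int), Dom_solve a n motes → Pre_solve a n motes → Spec_solve a n motes (solve a n motes)

-- ===== LEMMAS AND PROOFS =====

-- B's sweep with the `best` accumulator stripped off: bpass = min best bfree (proof-only helper).
def bfree (n : Int) : List Int → Int → Int → Int → Int
  | [], _, _, adds => adds
  | m :: rest, a, i, adds =>
    if a ≤ m then
      min (adds + n - i)
        (bfree n rest
          ((a - 1) * 2 ^ (PySem.Int.bitLength (-(PySem.Int.floordiv (-m) (a - 1)) - 1)) + 1 + m)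
          (i + 1)
          (adds + (PySem.Int.bitLength (-(PySem.Int.floordiv (-m) (a - 1)) - 1) : Int)))
    else
      min (adds + n - i) (bfree n rest (a + m) (i + 1) adds)

lemma bpass_eq_min (n : Int) : ∀ (xs : List Int) (a i adds best : Int),
    bpass n xs a i adds best = min best (bfree n xs a i adds) := by
  intro xs
  induction xs with
  | nil => intro a i adds best; simp [bpass, bfree]
  | cons m rest ih =>
    intro a i adds best
    by_cases h : a ≤ m
    · simp only [bpass, bfree, if_pos h, ih]
      omega
    · simp only [bpass, bfree, if_neg h, ih]
      omega

-- the accumulated additions are a lower bound on the remaining sweep (when n ≥ last index)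
lemma bfree_ge (n : Int) : ∀ (xs : List Int) (a i adds : Int),
    i + (xs.length : Int) ≤ n + 1 → adds ≤ bfree n xs a i adds := by
  intro xs
  induction xs with
  | nil => intro a i adds _; simp [bfree]
  | cons m rest ih =>
    intro a i adds hn
    simp only [List.length_cons] at hn
    have hi : i ≤ n := by push_cast at hn ⊢; omega
    by_cases h : a ≤ m
    · simp only [bfree, if_pos h]
      have h2 := ih ((a - 1) * 2 ^ (PySem.Int.bitLength (-(PySem.Int.floordiv (-m) (a - 1)) - 1)) + 1 + m) (i + 1)
        (adds + (PySem.Int.bitLength (-(PySem.Int.floordiv (-m) (a - 1)) - 1) : Int))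
        (by push_cast at hn ⊢; omega)
      have : (0 : Int) ≤ (PySem.Int.bitLength (-(PySem.Int.floordiv (-m) (a - 1)) - 1) : Int) := by positivity
      omega
    · simp only [bfree, if_neg h]
      have h2 := ih (a + m) (i + 1) adds (by push_cast at hn ⊢; omega)
      omega

-- the sum of the negative elements is nonpositive
lemma negsum_nonpos (xs : List Int) : ((xs.filter (fun m => decide (m < 0))).sum) ≤ 0 := by
  induction xs with
  | nil => simp
  | cons x t ih =>
    by_cases h : x < 0
    · simp [List.filter, h]; omega
    · simp [List.filter, h]; omega

-- if every element is nonnegative, the negative-filtered sum is 0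
lemma negsum_eq_zero_of_nonneg (xs : List Int) (h : ∀ m ∈ xs, 0 ≤ m) :
    ((xs.filter (fun m => decide (m < 0))).sum) = 0 := by
  induction xs with
  | nil => simp
  | cons x t ih =>
    have hx : ¬ x < 0 := by have := h x (by simp); omega
    simp [List.filter, hx]
    exact ih (fun m hm => h m (by simp [hm]))

-- B-side doubling model used only in the proofs, mirroring A's loop shifted by one
def dblB : Nat → Int → Int → Int × Int
  | 0, b, _ => (0, b)
  | f + 1, b, mote =>
    if b < mote then
      let r := dblB f (b + b) mote
      (r.1 + 1, r.2)
    else (0, b)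

-- A's doubling loop on a = b + 1 is dblB on b, shifted by one
lemma dblA_eq_dblB (f : Nat) : ∀ (b mote : Int),
    dblA f (b + 1) mote = ((dblB f b mote).1, (dblB f b mote).2 + 1) := by
  induction f with
  | zero => intro b mote; simp [dblA, dblB]
  | succ f ih =>
    intro b mote
    by_cases h : b < mote
    · have h' : b + 1 ≤ mote := by omega
      have e : b + 1 + (b + 1 - 1) = (b + b) + 1 := by ring
      simp only [dblA, dblB, if_pos h, if_pos h', e, ih (b + b) mote]
    · have h' : ¬ b + 1 ≤ mote := by omega
      simp [dblA, dblB, h, h']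

-- once b ≥ mote the loop is over, regardless of fuel
lemma dblB_of_ge (f : Nat) (b mote : Int) (h : mote ≤ b) : dblB f b mote = (0, b) := by
  cases f with
  | zero => rfl
  | succ f => simp [dblB, show ¬ b < mote by omega]

-- with sufficient fuel, dblB b m = (c, b·2^c) for the least c with b·2^c ≥ m
lemma dblB_pow (f : Nat) : ∀ (b m : Int), 1 ≤ b → (m - b).toNat ≤ f →
    ∃ c : Nat, dblB f b m = ((c : Int), b * 2 ^ c) ∧ m ≤ b * 2 ^ c ∧ ∀ j < c, b * 2 ^ j < m := by
  induction f with
  | zero =>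
    intro b m hb hf
    refine ⟨0, ?_, by omega, by omega⟩
    simp [dblB]
  | succ f ih =>
    intro b m hb hf
    by_cases h : b < m
    · obtain ⟨c, hc, hge, hmin⟩ := ih (b + b) m (by omega) (by omega)
      refine ⟨c + 1, ?_, ?_, ?_⟩
      · simp only [dblB, if_pos h, hc, Prod.mk.injEq]
        exact ⟨by push_cast; ring, by ring⟩
      · have : (b + b) * 2 ^ c = b * 2 ^ (c + 1) := by ring
        omega
      · intro j hj
        cases j with
        | zero => simpa using h
        | succ j' =>
          have := hmin j' (by omega)
          have e : (b + b) * 2 ^ j' = b * 2 ^ (j' + 1) := by ring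
          omega
    · refine ⟨0, ?_, by omega, by omega⟩
      rw [dblB_of_ge (f + 1) b m (by omega)]
      simp
  
-- the least c with b·2^c ≥ m is the bit length of ceil(m/b) - 1
lemma bitLength_eq_least (b m : Int) (c : Nat) (hb : 1 ≤ b) (hm : 1 ≤ m)
    (hge : m ≤ b * 2 ^ c) (hmin : ∀ j < c, b * 2 ^ j < m) :
    PySem.Int.bitLength (-(PySem.Int.floordiv (-m) b) - 1) = c := by
  set q : Int := -(PySem.Int.floordiv (-m) b) with hqdef
  have hq : (q - 1) * b < m ∧ m ≤ q * b :=
    (PySem.Int.neg_floordiv_neg_eq_iff_of_pos (by omega)).mp rfl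
  have hq1 : 1 ≤ q := by nlinarith [hq.1, hq.2]
  by_cases hq2 : q = 1
  · -- no doubling needed: m ≤ b, so c = 0
    have hc0 : c = 0 := by
      by_contra hc
      have := hmin 0 (by omega)
      simp only [pow_zero, mul_one] at this
      have : m ≤ b := by nlinarith [hq.2]
      omega
    subst hc0
    simp [hq2, PySem.Int.bitLength_zero]
  · have hx1 : 1 ≤ q - 1 := by omega
    set bl := PySem.Int.bitLength (q - 1) with hbl
    have hub : (q - 1).natAbs < 2 ^ bl := PySem.Int.lt_two_pow_bitLength (q - 1)
    have hlb : 2 ^ (bl - 1) ≤ (q - 1).natAbs := PySem.Int.two_pow_bitLength_le (q - 1) (by omega)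
    have habs : ((q - 1).natAbs : Int) = q - 1 := Int.natAbs_of_nonneg (by omega)
    -- q - 1 < 2^c  (from m ≤ b·2^c and (q-1)·b < m)
    have hqlt : (q - 1).natAbs < 2 ^ c := by
      have h1 : (q - 1) * b < b * 2 ^ c := by omega
      have h2 : (q - 1) * b < ((2 : Int) ^ c) * b := by nlinarith
      have h3 : q - 1 < (2 : Int) ^ c := lt_of_mul_lt_mul_right h2 (by omega)
      have h4 : ((q - 1).natAbs : Int) < (((2 : Nat) ^ c : Nat) : Int) := by
        rw [habs]; push_cast; omega
      exact_mod_cast h4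
    -- bl ≤ c
    have hble : bl ≤ c := by
      rcases Nat.eq_zero_or_pos bl with h0 | hpos
      · omega
      · have : (2 : Nat) ^ (bl - 1) < 2 ^ c := lt_of_le_of_lt hlb hqlt
        have := (Nat.pow_lt_pow_iff_right (by omega : 1 < 2)).mp this
        omega
    -- c ≤ bl
    have hcle : c ≤ bl := by
      rcases Nat.eq_zero_or_pos c with hc0 | hcpos
      · omega
      · have hmn := hmin (c - 1) (by omega)
        -- 2^(c-1) < q
        have h2q : (2 : Int) ^ (c - 1) < q := by
          by_contra hle
          push Not at hle
          have : m ≤ (2 : Int) ^ (c - 1) * b := by nlinarith [hq.2]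
          nlinarith
        have h2x : (2 : Nat) ^ (c - 1) ≤ (q - 1).natAbs := by
          have : (((2 : Nat) ^ (c - 1) : Nat) : Int) ≤ ((q - 1).natAbs : Int) := by
            rw [habs]; push_cast; omega
          exact_mod_cast this
        have : (2 : Nat) ^ (c - 1) < 2 ^ bl := lt_of_le_of_lt h2x hub
        have := (Nat.pow_lt_pow_iff_right (by omega : 1 < 2)).mp this
        omega
    omega

-- main invariant: A's (build moteList, then scan with early exits) equals B's full sweep
lemma main_lemma (n : Int) : ∀ (xs : List Int) (a cur mn c : Int),
    2 ≤ a → 2 ≤ a + ((xs.filter (fun m => decide (m < 0))).sum) →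
    List.Pairwise (· ≤ ·) xs → c + (xs.length : Int) ≤ n + 1 →
    loop2A (loop1A n xs a c).1 cur mn = bpass n xs a c cur mn := by
  intro xs
  induction xs with
  | nil => intro a cur mn c _ _ _ _; simp [loop1A, loop2A, bpass]
  | cons m rest ih =>
    intro a cur mn c ha hneg hsort hn
    simp only [List.length_cons] at hn
    have hn' : (c + 1) + (rest.length : Int) ≤ n + 1 := by push_cast at hn ⊢; omega
    have hrest_sort := hsort.tail
    have hhead : ∀ x ∈ rest, m ≤ x := by
      intro x hx; exact (List.pairwise_cons.mp hsort).1 x hx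
    by_cases hm : m < a
    · -- absorb branch: B's extra candidate adds + n - c is dominated
      have hstep : ¬ a ≤ m := by omega
      have ha' : 2 ≤ a + m ∧ 2 ≤ (a + m) + ((rest.filter (fun m => decide (m < 0))).sum) := by
        by_cases h0 : m < 0
        · have : ((m :: rest).filter (fun m => decide (m < 0))).sum
              = m + ((rest.filter (fun m => decide (m < 0))).sum) := by
            simp [List.filter, h0]
          have := negsum_nonpos rest
          constructor <;> omega
        · have : ((m :: rest).filter (fun m => decide (m < 0))).sum
              = ((rest.filter (fun m => decide (m < 0))).sum) := by
            simp [List.filter, h0]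
          have := negsum_nonpos rest
          constructor <;> omega
      have hIH := ih (a + m) cur mn (c + 1) ha'.1 ha'.2 hrest_sort hn'
      simp only [loop1A, if_pos hm, bpass, if_neg hstep]
      rw [hIH, bpass_eq_min, bpass_eq_min]
      -- the candidate cur + n - c never wins: the rest of the sweep stays below it
      have hdom : bfree n rest (a + m) (c + 1) cur ≤ cur + n - c := by
        cases rest with
        | nil =>
          simp only [bfree]
          push_cast at hn
          omega
        | cons m' rest' =>
          by_cases h' : a + m ≤ m' <;> simp only [bfree, if_pos, h'] <;> omega
      omega
    · -- blocker branch
      have ham : a ≤ m := by omega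
      have hm1 : 1 ≤ m := by omega
      -- rest has no negative motes (all ≥ m ≥ 2)
      have hneg_rest : ((rest.filter (fun m => decide (m < 0))).sum) = 0 :=
        negsum_eq_zero_of_nonneg rest (fun x hx => by have := hhead x hx; omega)
      -- characterize A's doubling loop via dblB and the bit-length closed form
      obtain ⟨K, hK, hKge, hKmin⟩ :=
        dblB_pow (m.natAbs + a.natAbs + 2) (a - 1) m (by omega) (by omega)
      have hbl : PySem.Int.bitLength (-(PySem.Int.floordiv (-m) (a - 1)) - 1) = K :=
        bitLength_eq_least (a - 1) m K (by omega) hm1 hKge hKmin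
      have hcorr := dblA_eq_dblB (m.natAbs + a.natAbs + 2) (a + (a - 1) - 1) m
      have e1 : a + (a - 1) - 1 + 1 = a + (a - 1) := by ring
      rw [e1] at hcorr
      have e2 : a + (a - 1) - 1 = (a - 1) + (a - 1) := by ring
      -- one unfolding step of dblB at a-1 (a - 1 < m)
      have hb1 : a - 1 < m := by omega
      have hBstep : dblB (m.natAbs + a.natAbs + 2) (a - 1) m
          = ((dblB (m.natAbs + a.natAbs + 1) ((a - 1) + (a - 1)) m).1 + 1,
             (dblB (m.natAbs + a.natAbs + 1) ((a - 1) + (a - 1)) m).2) := by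
        simp [dblB, hb1]
      -- fuel irrelevance for the inner call: both values exceed the needed fuel; use dblB_pow twice
      obtain ⟨K', hK', hK'ge, hK'min⟩ :=
        dblB_pow (m.natAbs + a.natAbs + 1) ((a - 1) + (a - 1)) m (by omega) (by omega)
      obtain ⟨K'', hK'', hK''ge, hK''min⟩ :=
        dblB_pow (m.natAbs + a.natAbs + 2) ((a - 1) + (a - 1)) m (by omega) (by omega)
      have hKK : K' = K'' := by
        rcases Nat.lt_trichotomy K' K'' with h | h | h
        · have := hK''min K' h; omega
        · exact h
        · have := hK'min K'' h; omega
      -- A's loop values in terms of K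
      have hcnt : 1 + (dblA (m.natAbs + a.natAbs + 2) (a + (a - 1)) m).1 = (K : Int) := by
        rw [hcorr, e2, hK'']
        have : (dblB (m.natAbs + a.natAbs + 2) (a - 1) m).1 = (K : Int) := by rw [hK]
        rw [hBstep, hK'] at this
        omega
      have hend : (dblA (m.natAbs + a.natAbs + 2) (a + (a - 1)) m).2 = (a - 1) * 2 ^ K + 1 := by
        have h2 : (dblB (m.natAbs + a.natAbs + 2) (a - 1) m).2 = (a - 1) * 2 ^ K := by rw [hK]
        rw [hBstep, hK'] at h2
        rw [hcorr, e2, hK'']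
        simp only at h2 ⊢
        rw [← hKK]
        omega
      -- now compare the two branch bodies
      simp only [loop1A, if_neg hm, bpass, if_pos ham, loop2A, hbl]
      rw [hend, hcnt]
      set a' : Int := (a - 1) * 2 ^ K + 1 + m with ha'
      have ha'2 : 2 ≤ a' := by
        have : (1 : Int) ≤ 2 ^ K := one_le_pow₀ (by omega)
        nlinarith
      have hIH := ih a' (cur + (K : Int)) (min mn (cur + (n - c))) (c + 1)
        ha'2 (by omega) hrest_sort hn'
      by_cases hlt : (K : Int) < n - c
      · by_cases hcut : min mn (cur + (n - c)) ≤ cur + (K : Int)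
        · -- A's second early return; B's remaining sweep never goes below
          simp only [if_pos hlt, if_pos hcut]
          rw [bpass_eq_min]
          have := bfree_ge n rest a' (c + 1) (cur + (K : Int)) hn'
          omega
        · simp only [if_pos hlt, if_neg hcut]
          rw [hIH]
          congr 1
          omega
      · -- A's first early return (add ≥ remove); B's adds already exceed the candidate
        simp only [if_neg hlt]
        rw [bpass_eq_min]
        have := bfree_ge n rest a' (c + 1) (cur + (K : Int)) hn'
        omega

-- ===== VERDICT (by name: the statement is the Claim_ definition above) =====
theorem solve_spec : Claim_equal_solve := by
  intro a n motes _ hpre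
  unfold Spec_solve solve solve_alt
  by_cases h1 : a = 1
  · simp [h1]
  · rcases hpre with h | ⟨ha, hneg, hlen⟩
    · exact absurd h h1
    simp only [if_neg h1]
    have hperm : (PySem.List.sorted motes (fun x => x) false).Perm motes :=
      PySem.List.sorted_perm motes (fun x => x) false
    have hfilter : ((PySem.List.sorted motes (fun x => x) false).filter
        (fun m => decide (m < 0))).sum = ((motes.filter (fun m => decide (m < 0))).sum) :=
      (hperm.filter _).sum_eq
    have hlen' : (PySem.List.sorted motes (fun x => x) false).length = motes.length :=
      hperm.length_eq
    have hsort : List.Pairwise (· ≤ ·) (PySem.List.sorted motes (fun x => x) false) :=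
      PySem.List.sorted_pairwise motes (fun x => x)
    exact main_lemma n _ a 0 101 0 ha (by omega) hsort (by rw [hlen']; omega)
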